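-- pv_equiv track=rewrite | github.com/sungbinlee/adventofcode | 2025/Day03/part1.py | large_jortage
-- ===== SOURCE A (Python) =====
-- def large_jortage(bank: list) -> int:
--     length = len(bank)
--     candidates = []
--     for idx, val in enumerate(bank):
--         if idx == length - 1:
--             break
--         candidates.append(val + max(bank[idx + 1:length]))
--     return int(max(candidates))
-- ===== SOURCE B (Python) =====
-- def large_jortage(bank: list) -> int:
--     suf = bank[-1]          # running max of the suffix to the right of the cursor
--     best = None
--     for v in reversed(bank[:-1]):
--         cand = v + suf
--         if best is None or cand > best:
--             best = cand
--         if v > suf: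
--             suf = v
--     return best
-- ===== Notes on version B (the rewrite author's own statement) =====
-- stated objective: faster
-- what changed: Replaces the per-index max over the remaining slice (quadratic) by one backward scan that carries a running suffix maximum and the running best sum.
-- outside the precondition, e.g. on large_jortage([]): A raises ValueError, B raises IndexError; on large_jortage([5]): A raises ValueError, B returns None
import Mathlib
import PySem

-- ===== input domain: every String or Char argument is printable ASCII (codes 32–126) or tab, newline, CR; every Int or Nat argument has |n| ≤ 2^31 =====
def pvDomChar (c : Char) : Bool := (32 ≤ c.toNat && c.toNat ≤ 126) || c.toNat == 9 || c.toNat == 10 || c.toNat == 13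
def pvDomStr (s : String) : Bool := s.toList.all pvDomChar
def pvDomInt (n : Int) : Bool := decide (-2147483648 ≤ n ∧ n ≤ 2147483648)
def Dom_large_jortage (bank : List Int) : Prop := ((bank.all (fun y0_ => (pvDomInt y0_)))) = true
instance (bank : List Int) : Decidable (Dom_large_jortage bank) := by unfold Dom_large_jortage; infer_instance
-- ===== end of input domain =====

-- B replaces A's per-index max over the remaining slice by a single backward scan
-- carrying a running suffix maximum (objective: faster, O(n) instead of O(n^2)).

-- ===== PORT A =====
-- loop 'for idx, val in enumerate(bank): if idx == length-1: break; candidates.append(val + max(bank[idx+1:length]))'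
def jorGo (bank : List Int) (length : Nat) : List (Int × Int) → List Int → List Int
  | [], cands => cands
  | (idx, val) :: rest, cands =>
    if idx = (length : Int) - 1 then cands
    else jorGo bank length rest
      (cands ++ [val + ((PySem.List.max? (PySem.List.slice bank (some (idx + 1)) (some (length : Int))) (fun y => y)).getD 0)])

def large_jortage (bank : List Int) : Int :=
  let length := bank.length
  let candidates := jorGo bank length (PySem.List.enumerate bank 0) []
  ((PySem.List.max? candidates (fun y => y)).getD 0)

-- ===== PORT B =====
-- loop state is (suf, best); returns best at the end
def altGo : List Int → Int → Option Int → Int × Option Int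
  | [], suf, best => (suf, best)
  | v :: rest, suf, best =>
    let cand := v + suf
    let best' := match best with
      | none => some cand
      | some b => if cand > b then some cand else some b
    altGo rest (if v > suf then v else suf) best'

def large_jortage_alt (bank : List Int) : Int :=
  match PySem.List.pyGet? bank (-1) with
  | none => 0      -- bank[-1] raises IndexError on []; outside Pre_
  | some suf0 =>
    ((altGo (PySem.List.slice bank none (some (-1))).reverse suf0 none).2).getD 0

-- ===== PRECONDITION & SPEC =====
-- Pre_ excludes lists of length < 2: there A raises ValueError (max of empty candidates)
-- or, for [], B raises IndexError; for a singleton B returns None, not an int.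
def Pre_large_jortage (bank : List Int) : Prop := 2 ≤ bank.length
instance (bank : List Int) : Decidable (Pre_large_jortage bank) := by unfold Pre_large_jortage; infer_instance
def pvWitness_large_jortage : List Int := [3, 1, 2]

def Spec_large_jortage (bank : List Int) (out : Int) : Prop := out = large_jortage_alt bank
instance (bank : List Int) (out : Int) : Decidable (Spec_large_jortage bank out) := by unfold Spec_large_jortage; infer_instance

-- ===== CLAIM (what is proved, stated in full; the proofs are below) =====
def Claim_equal_large_jortage : Prop := ∀ (bank : List Int), Dom_large_jortage bank → Pre_large_jortage bank → Spec_large_jortage bank (large_jortage bank)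

-- ===== LEMMAS AND PROOFS =====

-- max of a nonempty list, recursively
def mList : List Int → Int
  | [] => 0
  | [a] => a
  | a :: b :: t => max a (mList (b :: t))

-- max over i of bank[i] + max(bank[i+1:]), recursively (defined for length ≥ 2)
def specJ : List Int → Int
  | [] => 0
  | [_] => 0
  | [a, b] => a + b
  | a :: b :: c :: t => max (a + mList (b :: c :: t)) (specJ (b :: c :: t))

-- the candidate list A builds
def candsJ : List Int → List Int
  | a :: b :: t => (a + mList (b :: t)) :: candsJ (b :: t)
  | _ => []

def lastD : List Int → Int
  | [] => 0
  | [a] => a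
  | _ :: b :: t => lastD (b :: t)

theorem foldl_max_eq (t : List Int) : ∀ a : Int, t.foldl max a = if t = [] then a else max a (mList t) := by
  induction t with
  | nil => intro a; simp
  | cons c u ih =>
    intro a
    simp only [List.foldl_cons, ih (max a c)]
    cases u with
    | nil => simp [mList]
    | cons d w => simp [mList, max_assoc]

theorem max?_getD_eq (a : Int) (t : List Int) :
    (PySem.List.max? (a :: t) (fun y => y)).getD 0 = mList (a :: t) := by
  rw [PySem.List.max?_id_cons]
  simp only [Option.getD_some, foldl_max_eq]
  cases t with
  | nil => simp [mList]
  | cons b u => simp [mList]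

theorem mList_cons (a : Int) (t : List Int) (h : t ≠ []) : mList (a :: t) = max a (mList t) := by
  cases t with
  | nil => exact absurd rfl h
  | cons b u => simp [mList]

theorem jorGo_drop (bank : List Int) : ∀ (k : Nat) (acc : List Int), k ≤ bank.length →
    jorGo bank bank.length (PySem.List.enumerate (bank.drop k) (k : Int)) acc
      = acc ++ candsJ (bank.drop k) := by
  intro k
  induction hn : bank.length - k generalizing k with
  | zero =>
    intro acc hk
    have : bank.drop k = [] := by
      apply List.eq_nil_of_length_eq_zero; simp; omega
    simp [this, jorGo, candsJ]
  | succ m ih =>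
    intro acc hk
    have hlt : k < bank.length := by omega
    obtain ⟨v, rest, hvr⟩ : ∃ v rest, bank.drop k = v :: rest := by
      cases h : bank.drop k with
      | nil => exfalso; have := List.length_drop (l := bank) (i := k); rw [h] at this; simp at this; omega
      | cons v r => exact ⟨v, r, rfl⟩
    have hrest : rest = bank.drop (k + 1) := by
      have ht : (bank.drop k).tail = bank.drop (k + 1) := List.tail_drop ..
      rw [hvr] at ht; simpa using ht
    have hlen : rest.length = bank.length - (k + 1) := by rw [hrest]; simp
    rw [hvr, PySem.List.enumerate_cons]
    by_cases hlast : k = bank.length - 1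
    · have hre : rest = [] := by
        have : rest.length = 0 := by omega
        exact List.eq_nil_of_length_eq_zero this
      have hcond : (k : Int) = (bank.length : Int) - 1 := by omega
      simp [jorGo, hcond, hre, candsJ]
    · have hcond : ¬ ((k : Int) = (bank.length : Int) - 1) := by omega
      obtain ⟨b, u, hbu⟩ : ∃ b u, rest = b :: u := by
        cases h : rest with
        | nil => exfalso; rw [h] at hlen; simp at hlen; omega
        | cons b u => exact ⟨b, u, rfl⟩
      have h1 : ((k : Int) + 1) = ((k + 1 : Nat) : Int) := by push_cast; ring
      have hslice : PySem.List.slice bank (some ((k + 1 : Nat) : Int)) (some (bank.length : Int)) = rest := by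
        rw [PySem.List.slice_natCast, ← hrest]
        exact List.take_of_length_le (by omega)
      simp only [jorGo, if_neg hcond, h1, hslice]
      rw [hbu, max?_getD_eq, ← hbu]
      rw [hrest, ih (k + 1) (by omega) _ (by omega), ← hrest, hbu]
      simp [candsJ]

theorem mList_candsJ (bank : List Int) (h : 2 ≤ bank.length) : mList (candsJ bank) = specJ bank := by
  induction bank with
  | nil => simp at h
  | cons a t ih =>
    cases t with
    | nil => simp at h
    | cons b u =>
      cases u with
      | nil => simp [candsJ, mList, specJ]
      | cons c w =>
        have htl : candsJ (b :: c :: w) ≠ [] := by simp [candsJ]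
        rw [show candsJ (a :: b :: c :: w) = (a + mList (b :: c :: w)) :: candsJ (b :: c :: w) from rfl]
        rw [mList_cons _ _ htl, ih (by simp)]
        rfl

theorem A_eq_spec (bank : List Int) (h : 2 ≤ bank.length) : large_jortage bank = specJ bank := by
  have h0 := jorGo_drop bank 0 [] (by omega)
  simp only [List.drop_zero, Int.natCast_zero, List.nil_append] at h0
  show ((PySem.List.max? (jorGo bank bank.length (PySem.List.enumerate bank 0) []) (fun y => y)).getD 0) = specJ bank
  rw [h0]
  obtain ⟨c, cs, hc⟩ : ∃ c cs, candsJ bank = c :: cs := by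
    match bank, h with
    | a :: b :: t, _ => exact ⟨_, _, rfl⟩
  rw [hc, max?_getD_eq, ← hc, mList_candsJ bank h]

-- B side
theorem altGo_append (l1 l2 : List Int) (suf : Int) (best : Option Int) :
    altGo (l1 ++ l2) suf best = altGo l2 (altGo l1 suf best).1 (altGo l1 suf best).2 := by
  induction l1 generalizing suf best with
  | nil => rfl
  | cons v r ih => simp only [List.cons_append, altGo, ih]

theorem B_inv (t : List Int) : ∀ a : Int,
    altGo ((a :: t).dropLast.reverse) (lastD (a :: t)) none
      = (mList (a :: t), if t = [] then none else some (specJ (a :: t))) := by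
  induction t with
  | nil => intro a; simp [altGo, mList, lastD]
  | cons b u ih =>
    intro a
    have hdl : (a :: b :: u).dropLast.reverse = (b :: u).dropLast.reverse ++ [a] := by
      simp [List.dropLast_cons_of_ne_nil]
    rw [hdl, altGo_append]
    have hlast : lastD (a :: b :: u) = lastD (b :: u) := rfl
    rw [hlast, ih b]
    cases u with
    | nil =>
      simp only [altGo, mList, specJ]
      simp [max_def]
      omega
    | cons c w =>
      simp only [if_neg (by simp : ¬ (c :: w = []))]
      simp only [altGo]
      refine Prod.ext ?_ ?_
      · dsimp
        rw [mList_cons a _ (by simp)]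
        split <;> omega
      · dsimp
        rw [show specJ (a :: b :: c :: w) = max (a + mList (b :: c :: w)) (specJ (b :: c :: w)) from rfl]
        split <;> simp <;> omega

theorem getLast?_eq_lastD (l : List Int) (h : l ≠ []) : l.getLast? = some (lastD l) := by
  induction l with
  | nil => exact absurd rfl h
  | cons a t ih =>
    cases t with
    | nil => rfl
    | cons b u =>
      rw [List.getLast?_cons_cons, ih (by simp)]
      rfl

theorem B_eq_spec (bank : List Int) (h : 2 ≤ bank.length) : large_jortage_alt bank = specJ bank := by
  obtain ⟨a, b, t, hab⟩ : ∃ a b t, bank = a :: b :: t := by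
    match bank, h with
    | a :: b :: t, _ => exact ⟨a, b, t, rfl⟩
  subst hab
  unfold large_jortage_alt
  rw [PySem.List.pyGet?_neg_one, getLast?_eq_lastD _ (by simp)]
  show ((altGo (PySem.List.slice (a :: b :: t) none (some (-1))).reverse (lastD (a :: b :: t)) none).2).getD 0 = specJ (a :: b :: t)
  rw [PySem.List.slice_to_neg_one]
  rw [B_inv (b :: t) a]
  simp

-- ===== VERDICT (by name: the statement is the Claim_ definition above) =====
theorem large_jortage_spec : Claim_equal_large_jortage := by
  intro bank _ hpre
  unfold Spec_large_jortage
  rw [A_eq_spec bank hpre, B_eq_spec bank hpre]
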